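-- pv_equiv track=rewrite | github.com/RizwanMolla/GfG-POTD | Farthest Smaller Right/solution.py | farMin
-- ===== SOURCE A (Python) =====
-- def farMin(arr):
--     n = len(arr)
--     if n == 0:
--         return []
--
--     min_idx_suffix = [0] * n
--     min_idx_suffix[n-1] = n-1
--     for i in range(n-2, -1, -1):
--         if arr[i] <= arr[min_idx_suffix[i+1]]:
--             min_idx_suffix[i] = i
--         else:
--             min_idx_suffix[i] = min_idx_suffix[i+1]
--
--     ans = [-1] * n
--     for i in range(n):
--         j = i + 1
--         current_ans = -1
--         while j < n:
--             k = min_idx_suffix[j]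
--             if arr[k] < arr[i]:
--                 current_ans = k
--                 j = k + 1
--             else:
--                 j = k + 1
--                 break
--         ans[i] = current_ans
--
--     return ans
-- ===== SOURCE B (Python) =====
-- def farMin(arr):
--     n = len(arr)
--     # suffix minimum values: suf[t] = min(arr[t:]); nondecreasing in t
--     suf = list(arr)
--     for t in range(n - 2, -1, -1):
--         if suf[t + 1] < suf[t]:
--             suf[t] = suf[t + 1]
--     res = []
--     for i in range(n):
--         lo, hi, ans = i + 1, n - 1, -1
--         while lo <= hi:
--             mid = (lo + hi) // 2
--             if suf[mid] < arr[i]: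
--                 ans = mid
--                 lo = mid + 1
--             else:
--                 hi = mid - 1
--         res.append(ans)
--     return res
-- ===== Notes on version B (the rewrite author's own statement) =====
-- stated objective: alternative
-- what changed: Replaces A's per-index jump-chasing over a suffix-argmin index array with a suffix-minimum value array plus a per-index binary search for the rightmost position whose suffix minimum is below arr[i] (O(n log n) worst case vs A's O(n^2) worst case, but not measurably faster on the benchmark inputs).
import Mathlib
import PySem

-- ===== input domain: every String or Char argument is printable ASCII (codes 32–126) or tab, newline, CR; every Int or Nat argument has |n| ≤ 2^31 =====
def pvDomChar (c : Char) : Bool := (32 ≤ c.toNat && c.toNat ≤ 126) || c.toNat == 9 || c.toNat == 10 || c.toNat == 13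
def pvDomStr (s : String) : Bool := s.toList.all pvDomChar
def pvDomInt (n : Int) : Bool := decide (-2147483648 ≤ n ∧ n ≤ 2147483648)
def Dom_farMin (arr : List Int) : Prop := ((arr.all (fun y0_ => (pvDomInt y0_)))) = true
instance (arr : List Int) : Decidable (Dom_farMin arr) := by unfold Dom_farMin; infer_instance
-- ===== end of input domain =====

-- B replaces A's per-index jump-chasing over the suffix-argmin index array by a suffix-minimum
-- VALUE array plus a per-index binary search for the rightmost position whose suffix minimum
-- is below arr[i] (a different algorithm of comparable measured cost).

-- ===== PORT A =====
-- A's right-to-left loop filling min_idx_suffix: each entry is computed from the entry to its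
-- right exactly as the Python assignment does; entries are absolute indices, hence the +1 shift.
def suffMinIdx : List Int → List Nat
  | [] => []
  | a :: rest =>
    match (suffMinIdx rest).map (· + 1) with
    | [] => [0]
    | m :: tl => (if a ≤ (a :: rest).getD m 0 then 0 else m) :: m :: tl

-- A's inner while loop; all indices it reads are in range, so List.getD is exact Python indexing.
-- fuel = n suffices: j strictly increases each iteration (the guard only makes the recursion total).
def loopA (arr : List Int) (ms : List Nat) (x : Int) : Nat → Nat → Int → Int
  | 0, _, cur => cur
  | fuel + 1, j, cur =>
    if j < arr.length then
      let k := ms.getD j 0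
      if arr.getD k 0 < x then loopA arr ms x fuel (k + 1) ((k : Int))
      else cur
    else cur

def farMin (arr : List Int) : List Int :=
  let n := arr.length
  if n = 0 then []
  else
    let ms := suffMinIdx arr
    (List.range n).map (fun i => loopA arr ms (arr.getD i 0) n (i + 1) (-1))

-- ===== PORT B =====
-- B's right-to-left loop: suf[t] = min of arr[t:], written as the Python 'if suf[t+1] < suf[t]'.
def suffMin : List Int → List Int
  | [] => []
  | a :: rest =>
    match suffMin rest with
    | [] => [a]
    | m :: tl => (if m < a then m else a) :: m :: tl

-- B's binary-search while loop; mid = (lo+hi)//2 is Python floor division, and mid is nonnegative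
-- and in range whenever it is read (lo ≥ 1, hi ≤ n-1), so .toNat + getD is exact Python indexing.
-- fuel = n+1 suffices: the interval [lo,hi] shrinks strictly each iteration.
def loopB (suf : List Int) (x : Int) : Nat → Int → Int → Int → Int
  | 0, _, _, ans => ans
  | fuel + 1, lo, hi, ans =>
    if lo ≤ hi then
      let mid := PySem.Int.floordiv (lo + hi) 2
      if suf.getD mid.toNat 0 < x then loopB suf x fuel (mid + 1) hi mid
      else loopB suf x fuel lo (mid - 1) ans
    else ans

def farMin_alt (arr : List Int) : List Int :=
  let n := arr.length
  let suf := suffMin arr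
  (List.range n).map (fun i =>
    loopB suf (arr.getD i 0) (n + 1) ((i : Int) + 1) ((n : Int) - 1) (-1))

-- ===== PRECONDITION & SPEC =====
def Spec_farMin (arr : List Int) (out : List Int) : Prop := out = farMin_alt arr
instance (arr : List Int) (out : List Int) : Decidable (Spec_farMin arr out) := by unfold Spec_farMin; infer_instance

-- ===== CLAIM (what is proved, stated in full; the proofs are below) =====
def Claim_equal_farMin : Prop := ∀ (arr : List Int), Dom_farMin arr → Spec_farMin arr (farMin arr)

-- ===== LEMMAS AND PROOFS =====

-- rightmost index t ∈ [j, m) with arr[t] < x (the common characterisation of both loops)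
def rml (arr : List Int) (x : Int) (j : Nat) : Nat → Option Nat
  | 0 => none
  | m + 1 =>
    if j ≤ m then (if arr.getD m 0 < x then some m else rml arr x j m) else none

theorem rml_none (arr : List Int) (x : Int) (j m : Nat)
    (h : ∀ t, j ≤ t → t < m → ¬ arr.getD t 0 < x) : rml arr x j m = none := by
  induction m with
  | zero => rfl
  | succ m ih =>
    unfold rml
    split_ifs with h1 h2
    · exact absurd h2 (h m h1 (by omega))
    · exact ih (fun t ht1 ht2 => h t ht1 (by omega))
    · rfl

theorem rml_some (arr : List Int) (x : Int) (j m r : Nat)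
    (h1 : j ≤ r) (h2 : r < m) (h3 : arr.getD r 0 < x)
    (h4 : ∀ t, r < t → t < m → ¬ arr.getD t 0 < x) : rml arr x j m = some r := by
  induction m with
  | zero => omega
  | succ m ih =>
    by_cases hr : r = m
    · subst hr
      simp only [rml]
      rw [if_pos h1, if_pos h3]
    · have hrm : r < m := by omega
      simp only [rml]
      rw [if_pos (by omega : j ≤ m), if_neg (h4 m (by omega) (by omega))]
      exact ih hrm (fun t ht1 ht2 => h4 t ht1 (by omega))

theorem rml_step (arr : List Int) (x : Int) (j k m : Nat)
    (hjk : j ≤ k) (hk : k < m) (hx : arr.getD k 0 < x) :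
    rml arr x j m = some ((rml arr x (k + 1) m).getD k) := by
  induction m with
  | zero => omega
  | succ m ih =>
    by_cases hkm : k = m
    · subst hkm
      simp only [rml]
      rw [if_pos hjk, if_pos hx, if_neg (by omega : ¬ k + 1 ≤ k)]
      rfl
    · have hk' : k < m := by omega
      have hR : rml arr x (k + 1) (m + 1) =
          if arr.getD m 0 < x then some m else rml arr x (k + 1) m := by
        simp only [rml]
        rw [if_pos (by omega : k + 1 ≤ m)]
      rw [hR]
      split_ifs with hb
      · simp only [rml]
        rw [if_pos (by omega : j ≤ m), if_pos hb]
        rfl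
      · have hL : rml arr x j (m + 1) = rml arr x j m := by
          simp only [rml]
          rw [if_pos (by omega : j ≤ m), if_neg hb]
        rw [hL]
        exact ih hk'

-- the suffix-argmin array: length, bounds, and the minimum property
theorem suffMinIdx_spec (arr : List Int) :
    (suffMinIdx arr).length = arr.length ∧
    ∀ t, t < arr.length →
      t ≤ (suffMinIdx arr).getD t 0 ∧ (suffMinIdx arr).getD t 0 < arr.length ∧
      ∀ u, t ≤ u → u < arr.length →
        arr.getD ((suffMinIdx arr).getD t 0) 0 ≤ arr.getD u 0 := by
  induction arr with
  | nil => exact ⟨rfl, fun t ht => by simp at ht⟩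
  | cons a rest ih =>
    obtain ⟨ihlen, ihspec⟩ := ih
    rcases hr : suffMinIdx rest with _ | ⟨m0, tl0⟩
    · -- rest must be empty
      have hrest : rest = [] := by
        have := ihlen; rw [hr] at this; exact List.length_eq_zero_iff.mp this.symm
      subst hrest
      refine ⟨by simp [suffMinIdx], fun t ht => ?_⟩
      have ht0 : t = 0 := by simpa using ht
      subst ht0
      refine ⟨by simp [suffMinIdx], by simp [suffMinIdx], fun u hu1 hu2 => ?_⟩
      have hu0 : u = 0 := by simpa using hu2
      subst hu0
      exact le_refl _
    · have hne : rest.length = tl0.length + 1 := by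
        have := ihlen; rw [hr] at this; simpa using this.symm
      have hlc : (a :: rest).length = rest.length + 1 := rfl
      have hshape : suffMinIdx (a :: rest) =
          (if a ≤ (a :: rest).getD (m0 + 1) 0 then 0 else m0 + 1) :: (m0 + 1) :: tl0.map (· + 1) := by
        unfold suffMinIdx
        rw [hr]
        simp
      have hm0 := ihspec 0 (by omega)
      rw [hr] at hm0
      simp only [List.getD_cons_zero] at hm0
      obtain ⟨-, hm0lt, hm0min⟩ := hm0
      constructor
      · rw [hshape]; simp [hne]
      · intro t ht
        rw [hshape]
        match t with
        | 0 =>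
          simp only [List.getD_cons_zero]
          split_ifs with hcmp
          · refine ⟨Nat.le_refl 0, by omega, fun u _ hu => ?_⟩
            match u with
            | 0 => simp
            | u + 1 =>
              simp only [List.getD_cons_succ] at *
              exact le_trans hcmp (hm0min u (by omega) (by omega))
          · refine ⟨by omega, by omega, fun u _ hu => ?_⟩
            simp only [List.getD_cons_succ]
            match u with
            | 0 =>
              simp only [List.getD_cons_zero]
              push_neg at hcmp
              simpa using le_of_lt hcmp
            | u + 1 =>
              simp only [List.getD_cons_succ]
              exact hm0min u (by omega) (by omega)
        | t + 1 =>
          -- entry t+1 of the cons is entry t of the shifted tail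
          have htlen : t < rest.length := by simpa using ht
          have hgt := ihspec t htlen
          rw [hr] at hgt
          have hacc : ((m0 + 1) :: tl0.map (· + 1)).getD t 0 = (m0 :: tl0).getD t 0 + 1 := by
            match t, htlen with
            | 0, _ => simp
            | t + 1, htlen =>
              have ht' : t < tl0.length := by omega
              rw [List.getD_cons_succ, List.getD_cons_succ,
                List.getD_eq_getElem _ _ (by simpa using ht'),
                List.getD_eq_getElem _ _ ht', List.getElem_map]
          simp only [List.getD_cons_succ, hacc]
          obtain ⟨hg1, hg2, hg3⟩ := hgt
          refine ⟨by omega, by omega, fun u hu1 hu2 => ?_⟩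
          match u with
          | 0 => omega
          | u + 1 =>
            simp only [List.getD_cons_succ]
            exact hg3 u (by omega) (by simpa using hu2)

-- loopA computes the rightmost smaller element: A's jump chain characterised by rml
theorem loopA_eq (arr : List Int) (x : Int) :
    ∀ fuel j cur, arr.length - j < fuel →
    loopA arr (suffMinIdx arr) x fuel j cur =
      (rml arr x j arr.length).elim cur (fun r => (r : Int)) := by
  intro fuel
  induction fuel with
  | zero => intro j cur h; omega
  | succ fuel ih =>
    intro j cur hfuel
    obtain ⟨-, hspec⟩ := suffMinIdx_spec arr
    unfold loopA
    dsimp only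
    by_cases hj : j < arr.length
    · obtain ⟨hk1, hk2, hk3⟩ := hspec j hj
      rw [if_pos hj]
      by_cases hx : arr.getD ((suffMinIdx arr).getD j 0) 0 < x
      · rw [if_pos hx, ih _ _ (by omega)]
        rw [rml_step arr x j _ arr.length hk1 hk2 hx]
        rcases rml arr x ((suffMinIdx arr).getD j 0 + 1) arr.length with _ | r <;> simp
      · rw [if_neg hx]
        have hnone : rml arr x j arr.length = none := by
          apply rml_none
          intro t ht1 ht2 hlt
          exact absurd (lt_of_le_of_lt (hk3 t ht1 ht2) hlt) (by omega)
        simp [hnone]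
    · rw [if_neg hj]
      have hnone : rml arr x j arr.length = none := rml_none _ _ _ _ (fun t ht1 ht2 => by omega)
      simp [hnone]

-- suffix-minimum array facts
theorem suffMin_spec (arr : List Int) :
    (suffMin arr).length = arr.length ∧
    ∀ t, t < arr.length →
      (∀ u, t ≤ u → u < arr.length → (suffMin arr).getD t 0 ≤ arr.getD u 0) ∧
      (∃ u, t ≤ u ∧ u < arr.length ∧ (suffMin arr).getD t 0 = arr.getD u 0) := by
  induction arr with
  | nil => exact ⟨rfl, fun t ht => by simp at ht⟩
  | cons a rest ih =>
    obtain ⟨ihlen, ihspec⟩ := ih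
    rcases hr : suffMin rest with _ | ⟨m, tl⟩
    · have hrest : rest = [] := by
        have := ihlen; rw [hr] at this; exact List.length_eq_zero_iff.mp this.symm
      subst hrest
      refine ⟨by simp [suffMin], fun t ht => ?_⟩
      have ht0 : t = 0 := by simpa using ht
      subst ht0
      constructor
      · intro u hu1 hu2
        have hu0 : u = 0 := by simpa using hu2
        subst hu0
        simp [suffMin]
      · exact ⟨0, le_refl 0, by simp, by simp [suffMin]⟩
    · have hshape : suffMin (a :: rest) = (if m < a then m else a) :: m :: tl := by
        unfold suffMin; rw [hr]
      have hlen : (suffMin (a :: rest)).length = (a :: rest).length := by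
        rw [hshape]
        have := ihlen; rw [hr] at this
        simpa using this
      refine ⟨hlen, fun t ht => ?_⟩
      match t with
      | 0 =>
        have hm := ihspec 0 (by rw [hr] at ihlen; simp at ihlen; omega)
        rw [hr] at hm
        simp only [List.getD_cons_zero] at hm
        obtain ⟨hmin, u0, hu0a, hu0b, hu0c⟩ := hm
        rw [hshape]
        simp only [List.getD_cons_zero]
        split_ifs with hma
        · constructor
          · intro u _ hu
            match u with
            | 0 => simp; omega
            | u + 1 =>
              simp only [List.getD_cons_succ]
              exact hmin u (by omega) (by simpa using hu)
          · exact ⟨u0 + 1, by omega, by simpa using hu0b, by simpa using hu0c⟩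
        · constructor
          · intro u _ hu
            match u with
            | 0 => simp
            | u + 1 =>
              simp only [List.getD_cons_succ]
              push_neg at hma
              exact le_trans hma (hmin u (by omega) (by simpa using hu))
          · exact ⟨0, by omega, by simp, by simp⟩
      | t + 1 =>
        have htlen : t < rest.length := by simpa using ht
        have hgt := ihspec t htlen
        rw [hr] at hgt
        obtain ⟨hmin, u0, hu0a, hu0b, hu0c⟩ := hgt
        rw [hshape]
        simp only [List.getD_cons_succ]
        constructor
        · intro u hu1 hu2
          match u with
          | 0 => omega
          | u + 1 =>
            simp only [List.getD_cons_succ]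
            exact hmin u (by omega) (by simpa using hu2)
        · exact ⟨u0 + 1, by omega, by simpa using hu0b, by simpa using hu0c⟩

theorem suffMin_mono (arr : List Int) (t t' : Nat) (h1 : t' ≤ t) (h2 : t < arr.length) :
    (suffMin arr).getD t' 0 ≤ (suffMin arr).getD t 0 := by
  obtain ⟨-, hspec⟩ := suffMin_spec arr
  obtain ⟨-, u, hu1, hu2, hu3⟩ := hspec t h2
  obtain ⟨hmin, -⟩ := hspec t' (by omega)
  rw [hu3]
  exact hmin u (by omega) hu2

theorem suffMin_cons_rel (arr : List Int) :
    ∀ t, t + 1 < arr.length →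
      (suffMin arr).getD t 0 =
        if (suffMin arr).getD (t + 1) 0 < arr.getD t 0 then (suffMin arr).getD (t + 1) 0
        else arr.getD t 0 := by
  induction arr with
  | nil => intro t ht; simp at ht
  | cons a rest ih =>
    intro t ht
    rcases hr : suffMin rest with _ | ⟨m, tl⟩
    · have hrest : rest = [] := by
        have := (suffMin_spec rest).1; rw [hr] at this
        exact List.length_eq_zero_iff.mp this.symm
      subst hrest; simp at ht
    · have hshape : suffMin (a :: rest) = (if m < a then m else a) :: m :: tl := by
        unfold suffMin; rw [hr]
      match t with
      | 0 => rw [hshape]; simp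
      | t + 1 =>
        rw [hshape]
        simp only [List.getD_cons_succ]
        have := ih t (by simpa using ht)
        rw [hr] at this
        exact this

theorem suffMin_last (arr : List Int) :
    ∀ t, t + 1 = arr.length → (suffMin arr).getD t 0 = arr.getD t 0 := by
  induction arr with
  | nil => intro t ht; simp at ht
  | cons a rest ih =>
    intro t ht
    rcases hr : suffMin rest with _ | ⟨m, tl⟩
    · have hrest : rest = [] := by
        have := (suffMin_spec rest).1; rw [hr] at this
        exact List.length_eq_zero_iff.mp this.symm
      subst hrest
      have : t = 0 := by simpa using ht
      subst this
      simp [suffMin]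
    · have hshape : suffMin (a :: rest) = (if m < a then m else a) :: m :: tl := by
        unfold suffMin; rw [hr]
      match t with
      | 0 =>
        have : rest.length = 0 := by simpa using ht
        have h2 := (suffMin_spec rest).1; rw [hr] at h2
        simp [this] at h2
      | t + 1 =>
        rw [hshape]
        simp only [List.getD_cons_succ]
        have := ih t (by simpa using ht)
        rw [hr] at this
        simpa using this

-- the value B's binary search returns once lo > hi, from its invariants
theorem loopB_final (arr : List Int) (x : Int) (lo hi ans : Int) (a : Nat)
    (ha : 1 ≤ a) (hlo : (a : Int) ≤ lo) (hhi : hi ≤ (arr.length : Int) - 1) (hterm : hi < lo)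
    (hinv : (ans = -1 ∧ lo = (a : Int)) ∨
      (ans = lo - 1 ∧ (a : Int) ≤ ans ∧ ans ≤ (arr.length : Int) - 1 ∧
        (suffMin arr).getD ans.toNat 0 < x))
    (h2 : ∀ t : Int, hi < t → t ≤ (arr.length : Int) - 1 →
        ¬ (suffMin arr).getD t.toNat 0 < x) :
    ans = (rml arr x a arr.length).elim (-1 : Int) (fun r => (r : Int)) := by
  obtain ⟨-, hsm⟩ := suffMin_spec arr
  rcases hinv with ⟨h1, h2'⟩ | ⟨he, hge, hle, hP⟩
  · have : rml arr x a arr.length = none := by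
      apply rml_none
      intro t ht1 ht2 hlt
      have hx := h2 (t : Int) (by omega) (by omega)
      have : ((t : Int)).toNat = t := by omega
      rw [this] at hx
      obtain ⟨hmin, -⟩ := hsm t ht2
      exact hx (lt_of_le_of_lt (hmin t (le_refl t) ht2) hlt)
    simp [this, h1]
  · set r := ans.toNat with hrdef
    have hans : ans = (r : Int) := by omega
    have hra : a ≤ r := by omega
    have hrn : r < arr.length := by omega
    have harr : arr.getD r 0 < x := by
      by_cases hlast : r + 1 = arr.length
      · rw [← suffMin_last arr r hlast]; exact hP
      · have hcons := suffMin_cons_rel arr r (by omega)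
        have hnext := h2 ((r : Int) + 1) (by omega) (by omega)
        have : (((r : Int) + 1)).toNat = r + 1 := by omega
        rw [this] at hnext
        push_neg at hnext
        rw [hcons] at hP
        split_ifs at hP with hc
        · omega
        · exact hP
    have : rml arr x a arr.length = some r := by
      apply rml_some arr x a arr.length r hra hrn harr
      intro t ht1 ht2 hlt
      have hx := h2 (t : Int) (by omega) (by omega)
      have htn : ((t : Int)).toNat = t := by omega
      rw [htn] at hx
      obtain ⟨hmin, -⟩ := hsm t ht2
      exact hx (lt_of_le_of_lt (hmin t (le_refl t) ht2) hlt)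
    simp [this, hans]

-- loopB computes the same rightmost smaller element
theorem loopB_eq (arr : List Int) (x : Int) :
    ∀ (fuel : Nat) (lo hi ans : Int) (a : Nat), 1 ≤ a →
    (a : Int) ≤ lo → hi ≤ (arr.length : Int) - 1 → hi - lo < (fuel : Int) →
    ((ans = -1 ∧ lo = (a : Int)) ∨
      (ans = lo - 1 ∧ (a : Int) ≤ ans ∧ ans ≤ (arr.length : Int) - 1 ∧
        (suffMin arr).getD ans.toNat 0 < x)) →
    (∀ t : Int, hi < t → t ≤ (arr.length : Int) - 1 →
        ¬ (suffMin arr).getD t.toNat 0 < x) →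
    loopB (suffMin arr) x fuel lo hi ans =
      (rml arr x a arr.length).elim (-1 : Int) (fun r => (r : Int)) := by
  intro fuel
  induction fuel with
  | zero =>
    intro lo hi ans a ha hlo hhi hfuel hinv h2
    have hterm : hi < lo := by push_cast at hfuel; omega
    rw [show loopB (suffMin arr) x 0 lo hi ans = ans from rfl]
    exact loopB_final arr x lo hi ans a ha hlo hhi hterm hinv h2
  | succ fuel ih =>
    intro lo hi ans a ha hlo hhi hfuel hinv h2
    unfold loopB
    dsimp only
    have hfuel' : hi - lo < (fuel : Int) + 1 := by push_cast at hfuel; omega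
    obtain ⟨hmid1, hmid2⟩ : (lo ≤ hi → lo ≤ PySem.Int.floordiv (lo + hi) 2) ∧
        (lo ≤ hi → PySem.Int.floordiv (lo + hi) 2 ≤ hi) :=
      ⟨fun h => (PySem.Int.floordiv_two_mid_bounds h).1,
       fun h => (PySem.Int.floordiv_two_mid_bounds h).2⟩
    split_ifs with hcmp hPx
    · -- found: move right, record mid
      have h1 := hmid1 hcmp
      have h2' := hmid2 hcmp
      apply ih (PySem.Int.floordiv (lo + hi) 2 + 1) hi (PySem.Int.floordiv (lo + hi) 2)
        a ha (by omega) hhi (by omega)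
      · right
        exact ⟨by ring, by omega, by omega, hPx⟩
      · exact h2
    · -- not found: move left
      have h1 := hmid1 hcmp
      have h2' := hmid2 hcmp
      apply ih lo (PySem.Int.floordiv (lo + hi) 2 - 1) ans a ha hlo (by omega) (by omega) hinv
      intro t ht1 ht2 hlt
      by_cases hth : PySem.Int.floordiv (lo + hi) 2 ≤ t
      · -- monotonicity: suf[t] ≥ suf[mid] ≥ x
        have hmn : (PySem.Int.floordiv (lo + hi) 2).toNat ≤ t.toNat := by omega
        have htlt : t.toNat < arr.length := by omega
        have := suffMin_mono arr t.toNat (PySem.Int.floordiv (lo + hi) 2).toNat hmn htlt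
        exact hPx (lt_of_le_of_lt this hlt)
      · exact absurd ht1 (by omega)
    · exact loopB_final arr x lo hi ans a ha hlo hhi (by omega) hinv h2

-- ===== VERDICT (by name: the statement is the Claim_ definition above) =====
theorem farMin_spec : Claim_equal_farMin := by
  intro arr _
  unfold Spec_farMin farMin farMin_alt
  simp only []
  by_cases hn : arr.length = 0
  · simp [hn]
  · rw [if_neg hn]
    apply List.map_congr_left
    intro i hi
    rw [List.mem_range] at hi
    rw [loopA_eq arr (arr.getD i 0) arr.length (i + 1) (-1) (by omega)]
    rw [loopB_eq arr (arr.getD i 0) (arr.length + 1) ((i : Int) + 1)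
        ((arr.length : Int) - 1) (-1) (i + 1) (by omega) (by push_cast; omega)
        (by omega) (by push_cast; omega)
        (Or.inl ⟨rfl, by push_cast; ring⟩)
        (fun t ht1 ht2 => by omega)]
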